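-- pv_equiv track=rewrite | github.com/DESY-CMS-SUSY-TAU/LLStaus_Run2 | Analysis/macros/plot_pfcand_etaphi_show.py | determine_tau_decay_mode
-- ===== SOURCE A (Python) =====
-- def determine_tau_decay_mode(types_gen, tau_children_mask):
--
--     n_charged_hadrons = sum(1 for i, is_child in enumerate(tau_children_mask) if is_child and abs(types_gen[i]) == 211)
--     n_photons = sum(1 for i, is_child in enumerate(tau_children_mask) if is_child and abs(types_gen[i]) == 22)
--     n_electrons = sum(1 for i, is_child in enumerate(tau_children_mask) if is_child and abs(types_gen[i]) == 11)
--     n_muons = sum(1 for i, is_child in enumerate(tau_children_mask) if is_child and abs(types_gen[i]) == 13)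
--     n_neutral_hadrons = sum(1 for i, is_child in enumerate(tau_children_mask) if is_child and abs(types_gen[i]) in [111, 130, 310, 311])
--
--     if n_muons > 0:
--         return "Muon Decay"
--     elif n_electrons > 0:
--         return "Electron Decay"
--     elif n_charged_hadrons == 1 and n_photons == 0 and n_neutral_hadrons == 0:
--         return "1-Prong Hadronic"
--     elif n_charged_hadrons == 1 and n_neutral_hadrons > 0:
--         return "1-Prong + Neutral Hadrons"
--     elif n_charged_hadrons == 3 and n_neutral_hadrons == 0:
--         return "3-Prong Hadronic"
--     elif n_charged_hadrons == 3 and n_neutral_hadrons > 0: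
--         return "3-Prong + Neutral Hadrons"
--     else:
--         return "Other"
-- ===== SOURCE B (Python) =====
-- def determine_tau_decay_mode(types_gen, tau_children_mask):
--     n_charged_hadrons = n_photons = n_electrons = n_muons = n_neutral_hadrons = 0
--     for i, is_child in enumerate(tau_children_mask):
--         if not is_child:
--             continue
--         t = abs(types_gen[i])
--         if t == 211:
--             n_charged_hadrons += 1
--         elif t == 22:
--             n_photons += 1
--         elif t == 11:
--             n_electrons += 1
--         elif t == 13:
--             n_muons += 1
--         elif t in (111, 130, 310, 311):
--             n_neutral_hadrons += 1
--     if n_muons > 0: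
--         return "Muon Decay"
--     elif n_electrons > 0:
--         return "Electron Decay"
--     elif n_charged_hadrons == 1 and n_photons == 0 and n_neutral_hadrons == 0:
--         return "1-Prong Hadronic"
--     elif n_charged_hadrons == 1 and n_neutral_hadrons > 0:
--         return "1-Prong + Neutral Hadrons"
--     elif n_charged_hadrons == 3 and n_neutral_hadrons == 0:
--         return "3-Prong Hadronic"
--     elif n_charged_hadrons == 3 and n_neutral_hadrons > 0:
--         return "3-Prong + Neutral Hadrons"
--     else:
--         return "Other"
-- ===== Notes on version B (the rewrite author's own statement) =====
-- stated objective: simpler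
-- what changed: Replaces A's five separate generator-expression scans of the mask (one per particle category) with a single tabulating pass that maintains all five counters, then runs the same decision ladder; Pre_ excludes inputs where a True mask entry has no corresponding types_gen element, on which A raises IndexError.
import Mathlib
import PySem

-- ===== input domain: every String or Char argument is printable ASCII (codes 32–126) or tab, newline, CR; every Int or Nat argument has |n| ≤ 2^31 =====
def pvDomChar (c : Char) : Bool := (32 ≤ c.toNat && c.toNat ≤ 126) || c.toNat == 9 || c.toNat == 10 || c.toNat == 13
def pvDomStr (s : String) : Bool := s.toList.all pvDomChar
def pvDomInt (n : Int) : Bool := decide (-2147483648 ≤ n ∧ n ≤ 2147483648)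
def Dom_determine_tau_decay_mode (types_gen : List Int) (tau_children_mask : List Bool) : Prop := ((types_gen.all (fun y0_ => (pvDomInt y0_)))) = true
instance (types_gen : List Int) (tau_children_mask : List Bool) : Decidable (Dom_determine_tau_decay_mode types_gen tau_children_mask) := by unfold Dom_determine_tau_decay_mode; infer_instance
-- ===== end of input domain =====

-- B replaces A's five separate scans of the mask with one tabulating pass; same decision ladder.
-- ===== PORT A =====
-- count of masked children whose |type| satisfies p (shape of each of A's generator-expression sums)
def pvCountA (types_gen : List Int) (tau_children_mask : List Bool) (p : Int → Bool) : Nat :=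
  (PySem.List.enumerate tau_children_mask).foldl
    (fun acc ib => if ib.2 && p (((PySem.List.pyGet? types_gen ib.1).getD 0).natAbs) then acc + 1 else acc) 0

def determine_tau_decay_mode (types_gen : List Int) (tau_children_mask : List Bool) : String :=
  let n_charged_hadrons := pvCountA types_gen tau_children_mask (fun t => t == 211)
  let n_photons := pvCountA types_gen tau_children_mask (fun t => t == 22)
  let n_electrons := pvCountA types_gen tau_children_mask (fun t => t == 11)
  let n_muons := pvCountA types_gen tau_children_mask (fun t => t == 13)
  let n_neutral_hadrons := pvCountA types_gen tau_children_mask (fun t => t == 111 || t == 130 || t == 310 || t == 311)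
  if n_muons > 0 then "Muon Decay"
  else if n_electrons > 0 then "Electron Decay"
  else if n_charged_hadrons == 1 && n_photons == 0 && n_neutral_hadrons == 0 then "1-Prong Hadronic"
  else if n_charged_hadrons == 1 && n_neutral_hadrons > 0 then "1-Prong + Neutral Hadrons"
  else if n_charged_hadrons == 3 && n_neutral_hadrons == 0 then "3-Prong Hadronic"
  else if n_charged_hadrons == 3 && n_neutral_hadrons > 0 then "3-Prong + Neutral Hadrons"
  else "Other"

-- ===== PORT B =====
-- single pass: one fold over the enumerated mask maintaining the five counters
def pvStepB (types_gen : List Int) (s : Nat × Nat × Nat × Nat × Nat) (ib : Int × Bool) :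
    Nat × Nat × Nat × Nat × Nat :=
  if ib.2 then
    let t : Int := ((PySem.List.pyGet? types_gen ib.1).getD 0).natAbs
    if t == 211 then (s.1 + 1, s.2.1, s.2.2.1, s.2.2.2.1, s.2.2.2.2)
    else if t == 22 then (s.1, s.2.1 + 1, s.2.2.1, s.2.2.2.1, s.2.2.2.2)
    else if t == 11 then (s.1, s.2.1, s.2.2.1 + 1, s.2.2.2.1, s.2.2.2.2)
    else if t == 13 then (s.1, s.2.1, s.2.2.1, s.2.2.2.1 + 1, s.2.2.2.2)
    else if t == 111 || t == 130 || t == 310 || t == 311 then (s.1, s.2.1, s.2.2.1, s.2.2.2.1, s.2.2.2.2 + 1)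
    else s
  else s

def determine_tau_decay_mode_alt (types_gen : List Int) (tau_children_mask : List Bool) : String :=
  let counts := (PySem.List.enumerate tau_children_mask).foldl (pvStepB types_gen) (0, 0, 0, 0, 0)
  let n_charged_hadrons := counts.1
  let n_photons := counts.2.1
  let n_electrons := counts.2.2.1
  let n_muons := counts.2.2.2.1
  let n_neutral_hadrons := counts.2.2.2.2
  if n_muons > 0 then "Muon Decay"
  else if n_electrons > 0 then "Electron Decay"
  else if n_charged_hadrons == 1 && n_photons == 0 && n_neutral_hadrons == 0 then "1-Prong Hadronic"
  else if n_charged_hadrons == 1 && n_neutral_hadrons > 0 then "1-Prong + Neutral Hadrons"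
  else if n_charged_hadrons == 3 && n_neutral_hadrons == 0 then "3-Prong Hadronic"
  else if n_charged_hadrons == 3 && n_neutral_hadrons > 0 then "3-Prong + Neutral Hadrons"
  else "Other"

-- ===== PRECONDITION & SPEC =====
-- Pre_ excludes inputs where some True mask entry has no corresponding types_gen element: there
-- Python A raises IndexError (types_gen[i]).
def Pre_determine_tau_decay_mode (types_gen : List Int) (tau_children_mask : List Bool) : Prop :=
  ∀ ib ∈ PySem.List.enumerate tau_children_mask, ib.2 = true → ib.1 < (types_gen.length : Int)
instance (types_gen : List Int) (tau_children_mask : List Bool) : Decidable (Pre_determine_tau_decay_mode types_gen tau_children_mask) := by unfold Pre_determine_tau_decay_mode; infer_instance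

def pvWitness_determine_tau_decay_mode : List Int × List Bool := ([211, 22, -13], [true, false, true])

def Spec_determine_tau_decay_mode (types_gen : List Int) (tau_children_mask : List Bool) (out : String) : Prop := out = determine_tau_decay_mode_alt types_gen tau_children_mask
instance (types_gen : List Int) (tau_children_mask : List Bool) (out : String) : Decidable (Spec_determine_tau_decay_mode types_gen tau_children_mask out) := by unfold Spec_determine_tau_decay_mode; infer_instance

-- ===== CLAIM (what is proved, stated in full; the proofs are below) =====
def Claim_equal_determine_tau_decay_mode : Prop := ∀ (types_gen : List Int) (tau_children_mask : List Bool), Dom_determine_tau_decay_mode types_gen tau_children_mask → Pre_determine_tau_decay_mode types_gen tau_children_mask → Spec_determine_tau_decay_mode types_gen tau_children_mask (determine_tau_decay_mode types_gen tau_children_mask)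

-- ===== LEMMAS AND PROOFS =====
def pvCnt {β : Type} (f : β → Bool) : List β → Nat
  | [] => 0
  | x :: xs => (if f x then 1 else 0) + pvCnt f xs

theorem pvCount_foldl_eq {β : Type} (f : β → Bool) (l : List β) (a : Nat) :
    l.foldl (fun acc x => if f x then acc + 1 else acc) a = a + pvCnt f l := by
  induction l generalizing a with
  | nil => simp [pvCnt]
  | cons hd tl ih =>
    simp only [List.foldl_cons, pvCnt, ih]
    split <;> omega

theorem pvStepB_true (types_gen : List Int) (s : Nat × Nat × Nat × Nat × Nat) (i : Int) :
    pvStepB types_gen s (i, true) =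
      (s.1 + (if ((((PySem.List.pyGet? types_gen i).getD 0).natAbs : Int) == 211) then 1 else 0),
       s.2.1 + (if ((((PySem.List.pyGet? types_gen i).getD 0).natAbs : Int) == 22) then 1 else 0),
       s.2.2.1 + (if ((((PySem.List.pyGet? types_gen i).getD 0).natAbs : Int) == 11) then 1 else 0),
       s.2.2.2.1 + (if ((((PySem.List.pyGet? types_gen i).getD 0).natAbs : Int) == 13) then 1 else 0),
       s.2.2.2.2 + (if ((((PySem.List.pyGet? types_gen i).getD 0).natAbs : Int) == 111 || (((PySem.List.pyGet? types_gen i).getD 0).natAbs : Int) == 130 || (((PySem.List.pyGet? types_gen i).getD 0).natAbs : Int) == 310 || (((PySem.List.pyGet? types_gen i).getD 0).natAbs : Int) == 311) then 1 else 0)) := by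
  simp only [pvStepB]
  generalize (((PySem.List.pyGet? types_gen i).getD 0).natAbs : Int) = t
  split_ifs with h1 h2 h3 h4 h5 <;> simp_all [beq_iff_eq]

theorem pvFoldB_eq (types_gen : List Int) (l : List (Int × Bool)) (s : Nat × Nat × Nat × Nat × Nat) :
    l.foldl (pvStepB types_gen) s =
      (s.1 + pvCnt (fun ib => ib.2 && ((((PySem.List.pyGet? types_gen ib.1).getD 0).natAbs : Int) == 211)) l,
       s.2.1 + pvCnt (fun ib => ib.2 && ((((PySem.List.pyGet? types_gen ib.1).getD 0).natAbs : Int) == 22)) l,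
       s.2.2.1 + pvCnt (fun ib => ib.2 && ((((PySem.List.pyGet? types_gen ib.1).getD 0).natAbs : Int) == 11)) l,
       s.2.2.2.1 + pvCnt (fun ib => ib.2 && ((((PySem.List.pyGet? types_gen ib.1).getD 0).natAbs : Int) == 13)) l,
       s.2.2.2.2 + pvCnt (fun ib => ib.2 && ((((PySem.List.pyGet? types_gen ib.1).getD 0).natAbs : Int) == 111 || (((PySem.List.pyGet? types_gen ib.1).getD 0).natAbs : Int) == 130 || (((PySem.List.pyGet? types_gen ib.1).getD 0).natAbs : Int) == 310 || (((PySem.List.pyGet? types_gen ib.1).getD 0).natAbs : Int) == 311)) l) := by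
  induction l generalizing s with
  | nil => simp [pvCnt]
  | cons hd tl ih =>
    obtain ⟨i, b⟩ := hd
    simp only [List.foldl_cons, pvCnt, ih]
    cases b with
    | false => simp [pvStepB]
    | true =>
      rw [pvStepB_true]
      simp only [Prod.mk.injEq, Bool.true_and]
      refine ⟨?_, ?_, ?_, ?_, ?_⟩ <;> (split_ifs <;> omega)

-- ===== VERDICT (by name: the statement is the Claim_ definition above) =====
theorem determine_tau_decay_mode_spec : Claim_equal_determine_tau_decay_mode := by
  intro types_gen tau_children_mask _ _
  unfold Spec_determine_tau_decay_mode determine_tau_decay_mode determine_tau_decay_mode_alt pvCountA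
  rw [pvFoldB_eq]
  simp only [pvCount_foldl_eq, Nat.zero_add]
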